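-- pv_equiv track=rewrite | github.com/Leeyed/PointMatch | pointMatch.py | parseStdPredInf2List
-- ===== SOURCE A (Python) =====
-- def parseStdPredInf2List(stdInf):
--     sides=set()
--     for point in stdInf:
--         if point.get('side', 'NO_THIS_KEY') != 'NO_THIS_KEY':
--             sides.add(str(point['side']))
--     sides = list(sides)
--     sides.sort()
--
--     if len(sides)>1:
--         stdInfList=[]
--         for side in sides:
--             stdInfItem=list(filter(lambda x: str(x.get('side', 'NO_THIS_KEY')) == side, stdInf))
--             stdInfList.append(stdInfItem)
--         return stdInfList
--     return [stdInf]
-- ===== SOURCE B (Python) =====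
-- def parseStdPredInf2List(stdInf):
--     groups = {}
--     for point in stdInf:
--         s = str(point.get('side', 'NO_THIS_KEY'))
--         if s != 'NO_THIS_KEY':
--             groups.setdefault(s, []).append(point)
--     if len(groups) <= 1:
--         return [stdInf]
--     return [groups[k] for k in sorted(groups)]
-- ===== Notes on version B (the rewrite author's own statement) =====
-- stated objective: alternative
-- what changed: A collects the sorted side values and then re-filters the whole point list once per side; B makes a single pass building a dict from side value to its points (in original order) and emits the groups in sorted-key order.
import Mathlib
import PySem

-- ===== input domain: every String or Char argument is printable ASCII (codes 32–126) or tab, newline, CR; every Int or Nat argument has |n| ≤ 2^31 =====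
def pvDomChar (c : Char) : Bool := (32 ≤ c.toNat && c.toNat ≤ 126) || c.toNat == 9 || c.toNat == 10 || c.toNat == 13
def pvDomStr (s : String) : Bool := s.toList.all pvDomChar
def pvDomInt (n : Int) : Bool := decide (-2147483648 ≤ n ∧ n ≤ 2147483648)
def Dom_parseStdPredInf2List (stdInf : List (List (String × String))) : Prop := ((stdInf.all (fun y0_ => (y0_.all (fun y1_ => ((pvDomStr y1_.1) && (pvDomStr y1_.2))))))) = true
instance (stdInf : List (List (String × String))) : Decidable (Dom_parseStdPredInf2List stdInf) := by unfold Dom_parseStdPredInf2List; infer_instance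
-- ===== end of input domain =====

-- B replaces A's per-side repeated filtering of the whole list with a single grouping pass
-- over a dict keyed by the 'side' value (objective: alternative single-pass grouping).

-- ===== PORT A =====
-- point.get('side', 'NO_THIS_KEY') (a point is a Python dict)
def pvSide (point : List (String × String)) : String :=
  PySem.Dict.getD (PySem.Dict.mk point) "side" "NO_THIS_KEY"

-- A's side-collecting loop
def pvLoopA (l : List (List (String × String))) (s : PySem.Set String) : PySem.Set String :=
  l.foldl (fun s point =>
    if pvSide point ≠ "NO_THIS_KEY" then PySem.Set.add s (pvSide point) else s) s

def parseStdPredInf2List (stdInf : List (List (String × String))) : List (List (List (String × String))) :=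
  -- sides = set(); for point in stdInf: if …: sides.add(str(point['side']))
  let sides : PySem.Set String := pvLoopA stdInf PySem.Set.empty
  -- sides = list(sides); sides.sort()
  let sidesL := PySem.List.sorted sides (fun x => x) false
  if sidesL.length > 1 then
    -- for side in sides: stdInfList.append(list(filter(…)))
    sidesL.foldl (fun acc side =>
      acc ++ [stdInf.filter (fun x => pvSide x == side)]) []
  else [stdInf]

-- ===== PORT B =====
-- B's grouping loop
def pvLoopB (l : List (List (String × String))) (d : PySem.Dict String (List (List (String × String)))) :
    PySem.Dict String (List (List (String × String))) :=
  l.foldl (fun d point =>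
    let s := pvSide point
    if s ≠ "NO_THIS_KEY" then d.modify s [] (· ++ [point]) else d) d

def parseStdPredInf2List_alt (stdInf : List (List (String × String))) : List (List (List (String × String))) :=
  -- groups.setdefault(s, []).append(point)
  let groups : PySem.Dict String (List (List (String × String))) := pvLoopB stdInf PySem.Dict.empty
  if groups.size ≤ 1 then [stdInf]
  else (PySem.List.sorted groups.keys (fun x => x) false).map (fun k => groups.getD k [])

-- ===== PRECONDITION & SPEC =====
def Spec_parseStdPredInf2List (stdInf : List (List (String × String))) (out : List (List (List (String × String)))) : Prop := out = parseStdPredInf2List_alt stdInf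
instance (stdInf : List (List (String × String))) (out : List (List (List (String × String)))) : Decidable (Spec_parseStdPredInf2List stdInf out) := by unfold Spec_parseStdPredInf2List; infer_instance

-- ===== CLAIM (what is proved, stated in full; the proofs are below) =====
def Claim_equal_parseStdPredInf2List : Prop := ∀ (stdInf : List (List (String × String))), Dom_parseStdPredInf2List stdInf → Spec_parseStdPredInf2List stdInf (parseStdPredInf2List stdInf)

-- ===== LEMMAS AND PROOFS =====

theorem pvKeys_modify_add (d : PySem.Dict String (List (List (String × String)))) (k : String) (f) :
    (d.modify k [] f).keys = PySem.Set.add d.keys k := by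
  rw [PySem.Dict.keys_modify]
  cases h : d.contains k
  · rw [PySem.Dict.keys_insert_of_not_contains _ _ h]
    simp [PySem.Set.add, PySem.Set.contains, ← PySem.Dict.contains_eq_decide_mem_keys, h]
  · rw [PySem.Dict.keys_insert_of_contains _ _ h]
    simp [PySem.Set.add, PySem.Set.contains, ← PySem.Dict.contains_eq_decide_mem_keys, h]

theorem pvLoopB_cons (p t d) : pvLoopB (p :: t) d
    = pvLoopB t (if pvSide p ≠ "NO_THIS_KEY" then d.modify (pvSide p) [] (· ++ [p]) else d) := rfl

theorem pvLoopA_cons (p t s) : pvLoopA (p :: t) s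
    = pvLoopA t (if pvSide p ≠ "NO_THIS_KEY" then PySem.Set.add s (pvSide p) else s) := rfl

theorem pvLoop_keys (l : List (List (String × String))) (d : PySem.Dict String (List (List (String × String)))) :
    (pvLoopB l d).keys = pvLoopA l d.keys := by
  induction l generalizing d with
  | nil => rfl
  | cons p t ih =>
    rw [pvLoopB_cons, pvLoopA_cons]
    by_cases h : pvSide p ≠ "NO_THIS_KEY"
    · rw [if_pos h, if_pos h, ih, pvKeys_modify_add]
    · rw [if_neg h, if_neg h, ih]

theorem pvLoop_getD (l : List (List (String × String))) (d : PySem.Dict String (List (List (String × String))))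
    (k : String) (hk : k ≠ "NO_THIS_KEY") :
    (pvLoopB l d).getD k [] = d.getD k [] ++ l.filter (fun x => pvSide x == k) := by
  induction l generalizing d with
  | nil => simp [pvLoopB]
  | cons p t ih =>
    rw [pvLoopB_cons]
    by_cases h : pvSide p ≠ "NO_THIS_KEY"
    · rw [if_pos h, ih]
      by_cases hk2 : pvSide p = k
      · subst hk2
        rw [PySem.Dict.getD_modify_self]
        simp
      · rw [PySem.Dict.getD_modify_of_ne _ _ _ (fun e => hk2 e.symm)]
        simp [hk2]
    · rw [if_neg h, ih]
      rw [not_not] at h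
      have : pvSide p ≠ k := by rw [h]; exact fun e => hk e.symm
      simp [this]

theorem pvMem_loopA (l : List (List (String × String))) (s : PySem.Set String) (k : String)
    (hk : k ∈ pvLoopA l s) : k ∈ s ∨ k ≠ "NO_THIS_KEY" := by
  induction l generalizing s with
  | nil => exact Or.inl hk
  | cons p t ih =>
    rw [pvLoopA_cons] at hk
    by_cases h : pvSide p ≠ "NO_THIS_KEY"
    · rw [if_pos h] at hk
      rcases ih _ hk with h1 | h1
      · rcases (PySem.Set.mem_add s (pvSide p) k).mp h1 with h2 | h2
        · exact Or.inl h2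
        · exact Or.inr (h2 ▸ h)
      · exact Or.inr h1
    · rw [if_neg h] at hk
      exact ih _ hk

-- ===== VERDICT (by name: the statement is the Claim_ definition above) =====
theorem parseStdPredInf2List_spec : Claim_equal_parseStdPredInf2List := by
  intro stdInf _
  show parseStdPredInf2List stdInf = parseStdPredInf2List_alt stdInf
  unfold parseStdPredInf2List parseStdPredInf2List_alt
  have hkeys : (pvLoopB stdInf PySem.Dict.empty).keys = pvLoopA stdInf PySem.Set.empty := by
    simpa using pvLoop_keys stdInf PySem.Dict.empty
  have hsize : (pvLoopB stdInf PySem.Dict.empty).size = (pvLoopA stdInf PySem.Set.empty).length := by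
    have : (pvLoopB stdInf PySem.Dict.empty).size = (pvLoopB stdInf PySem.Dict.empty).keys.length := by
      simp [PySem.Dict.size, PySem.Dict.keys]
    rw [this, hkeys]
  show (if (PySem.List.sorted (pvLoopA stdInf PySem.Set.empty) (fun x => x) false).length > 1 then _ else _)
      = (if (pvLoopB stdInf PySem.Dict.empty).size ≤ 1 then _ else _)
  rw [PySem.List.length_sorted, hsize]
  by_cases hlen : (pvLoopA stdInf PySem.Set.empty).length ≤ 1
  · rw [if_neg (by omega), if_pos hlen]
  · rw [if_pos (by omega), if_neg hlen]
    rw [PySem.List.foldl_append_singleton_eq_map, List.nil_append, hkeys]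
    apply List.map_congr_left
    intro k hkmem
    have hk : k ≠ "NO_THIS_KEY" := by
      have := pvMem_loopA stdInf PySem.Set.empty k ((PySem.List.mem_sorted _ _ _ k).mp hkmem)
      simpa [PySem.Set.empty] using this
    rw [pvLoop_getD stdInf PySem.Dict.empty k hk]
    simp [PySem.Dict.empty, PySem.Dict.getD, PySem.Dict.get?]
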